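-- pv_equiv track=rewrite | github.com/MysteriousNeutrino/ml_sim_kc | junior/match_groups/match_groups.py | extend_matches
-- ===== SOURCE A (Python) =====
-- from typing import List, Tuple, Union
--
-- def extend_matches(groups: List[Union[Tuple[int, ...], List[int]]]) -> List[Tuple[int, ...]]:
--     """Add new groups based on existing ones"""
--     # Collect all unique ids
--     unique_ids = set()
--     for group in groups:
--         unique_ids.update(group)
--
--     # Create a dictionary of existing groups
--     groups_dict = {x: set([x]) for x in unique_ids}
--     for group in groups:
--         united_groups = set().union(*[groups_dict[x] for x in group])
--         for z in united_groups:
--             groups_dict[z].update(united_groups)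
--
--     # Create a list of new groups
--     new_groups = []
--     for x, x_groups in groups_dict.items():
--         new_groups.append(tuple(sorted(x_groups)))
--
--     # Drop self-groups and duplicates
--     new_groups = sorted(list(set(new_groups)))
--     return new_groups
-- ===== SOURCE B (Python) =====
-- def extend_matches(groups):
--     """Add new groups based on existing ones"""
--     # Maintain a partition: a list of disjoint components, merged incrementally.
--     parts = []
--     for group in groups:
--         merged, rest = [], []
--         for part in parts:
--             if any(x in group for x in part):
--                 merged.extend(part)
--             else:
--                 rest.append(part)
--         for x in group:
--             if x not in merged:
--                 merged.append(x)
--         parts = rest + [merged] if merged else rest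
--     return sorted(tuple(sorted(p)) for p in parts)
-- ===== Notes on version B (the rewrite author's own statement) =====
-- stated objective: faster
-- what changed: A maps every id to its own copy of the full component set, re-unioning and rewriting those sets for every member of every merged group and deduplicating the per-id copies at the end; B keeps a single partition as a list of disjoint components and merges the components a group touches by concatenation, so no per-member set copying or final dedup pass exists.
import Mathlib
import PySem

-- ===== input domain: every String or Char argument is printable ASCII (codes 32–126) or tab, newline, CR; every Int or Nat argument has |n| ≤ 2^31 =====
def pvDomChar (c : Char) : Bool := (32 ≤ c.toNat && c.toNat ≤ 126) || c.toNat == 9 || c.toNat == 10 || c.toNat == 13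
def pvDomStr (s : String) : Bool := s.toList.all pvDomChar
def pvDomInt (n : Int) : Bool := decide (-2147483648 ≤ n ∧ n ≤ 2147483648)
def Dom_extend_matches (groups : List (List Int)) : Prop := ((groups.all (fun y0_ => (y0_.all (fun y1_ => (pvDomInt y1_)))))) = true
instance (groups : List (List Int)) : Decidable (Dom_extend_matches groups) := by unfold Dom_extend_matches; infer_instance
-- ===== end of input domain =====

-- B replaces A's per-id dictionary of repeatedly re-unioned full component sets by a single
-- partition: a list of disjoint components merged incrementally (objective: faster, measured).

-- ===== PORT A =====
-- Transliteration of Source A. `groups_dict[x]` can never raise (every x of every group is in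
-- unique_ids), so it is ported as getD; Python's hash-iteration order over sets is consumed
-- only where the final sorted/dedup result cannot depend on it.
def extend_matches (groups : List (List Int)) : List (List Int) :=
  let unique_ids : PySem.Set Int :=
    groups.foldl (fun s group => PySem.Set.update s group) PySem.Set.empty
  let groups_dict : PySem.Dict Int (PySem.Set Int) :=
    unique_ids.foldl (fun d x => d.insert x (PySem.Set.ofList [x])) PySem.Dict.empty
  let groups_dict := groups.foldl (fun d group =>
    let united_groups : PySem.Set Int :=
      group.foldl (fun u x => PySem.Set.update u (d.getD x PySem.Set.empty)) PySem.Set.empty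
    united_groups.foldl
      (fun d' z => d'.modify z PySem.Set.empty (fun s => PySem.Set.update s united_groups)) d)
    groups_dict
  let new_groups : List (List Int) :=
    groups_dict.items.map (fun p => PySem.List.sorted p.2 (fun x => x))
  PySem.List.sorted (PySem.Set.ofList new_groups) (fun x => x)

-- ===== PORT B =====
-- Transliteration of Source B: one partition (a list of disjoint components); each group merges
-- every component it touches, plus its own fresh ids, into a single component.
def emMergeSplit (group : List Int) (parts : List (List Int)) : List Int × List (List Int) :=
  parts.foldl (fun mr part =>
    if part.any (fun x => group.contains x) then (mr.1 ++ part, mr.2) else (mr.1, mr.2 ++ [part]))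
    ([], [])

def emStep (parts : List (List Int)) (group : List Int) : List (List Int) :=
  let mr := emMergeSplit group parts
  let merged := group.foldl (fun m x => if m.contains x then m else m ++ [x]) mr.1
  if merged.isEmpty then mr.2 else mr.2 ++ [merged]

def extend_matches_alt (groups : List (List Int)) : List (List Int) :=
  PySem.List.sorted
    ((groups.foldl emStep []).map (fun p => PySem.List.sorted p (fun x => x)))
    (fun x => x)

-- ===== PRECONDITION & SPEC =====
def Spec_extend_matches (groups : List (List Int)) (out : List (List Int)) : Prop := out = extend_matches_alt groups
instance (groups : List (List Int)) (out : List (List Int)) : Decidable (Spec_extend_matches groups out) := by unfold Spec_extend_matches; infer_instance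

-- ===== CLAIM (what is proved, stated in full; the proofs are below) =====
def Claim_equal_extend_matches : Prop := ∀ (groups : List (List Int)), Dom_extend_matches groups → Spec_extend_matches groups (extend_matches groups)

-- ===== LEMMAS AND PROOFS =====

-- A's per-group dict-update step and initial dict, named for the proofs (same code as the port).
def aStep (d : PySem.Dict Int (PySem.Set Int)) (group : List Int) : PySem.Dict Int (PySem.Set Int) :=
  let united_groups : PySem.Set Int :=
    group.foldl (fun u x => PySem.Set.update u (d.getD x PySem.Set.empty)) PySem.Set.empty
  united_groups.foldl
    (fun d' z => d'.modify z PySem.Set.empty (fun s => PySem.Set.update s united_groups)) d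

def aInit (ids : List Int) : PySem.Dict Int (PySem.Set Int) :=
  ids.foldl (fun d x => d.insert x (PySem.Set.ofList [x])) PySem.Dict.empty

-- the coupling invariant between A's dict state and B's partition state
def Couple (ids : List Int) (d : PySem.Dict Int (PySem.Set Int)) (parts : List (List Int)) : Prop :=
  d.keys = ids ∧
  (∀ p ∈ parts, p ≠ [] ∧ p.Nodup ∧ ∀ x ∈ p, x ∈ ids) ∧
  parts.Pairwise List.Disjoint ∧
  (∀ x ∈ ids, (d.getD x PySem.Set.empty).Nodup) ∧
  (∀ x ∈ ids, ∀ p ∈ parts, x ∈ p → ∀ y, (y ∈ d.getD x PySem.Set.empty ↔ y ∈ p)) ∧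
  (∀ x ∈ ids, (∀ p ∈ parts, x ∉ p) → ∀ y, (y ∈ d.getD x PySem.Set.empty ↔ y = x))

-- ---- generic folding lemmas ----

lemma mem_foldl_update (f : Int → PySem.Set Int) (l : List Int) (s : PySem.Set Int) (y : Int) :
    y ∈ l.foldl (fun u x => PySem.Set.update u (f x)) s ↔ y ∈ s ∨ ∃ x ∈ l, y ∈ f x := by
  induction l generalizing s with
  | nil => simp
  | cons z l ih => simp [ih, PySem.Set.mem_update, or_assoc]

lemma nodup_foldl_update (f : Int → PySem.Set Int) (l : List Int) (s : PySem.Set Int)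
    (hs : s.Nodup) : (l.foldl (fun u x => PySem.Set.update u (f x)) s).Nodup := by
  induction l generalizing s with
  | nil => exact hs
  | cons z l ih => exact ih _ (PySem.Set.nodup_update _ _ hs)

lemma update_of_subset (s : PySem.Set Int) (l : List Int) (h : ∀ x ∈ l, x ∈ s) :
    PySem.Set.update s l = s := by
  rw [PySem.Set.update_eq_append_filter, List.filter_eq_nil_iff.mpr, List.append_nil]
  intro a ha
  simp only [Bool.not_eq_true', ← Bool.not_eq_true, PySem.Set.contains_iff]
  exact fun hn => hn (h a ((PySem.Set.mem_ofList l a).mp ha))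

lemma getD_foldl_modify_update (l : List Int) (hl : l.Nodup) (u : PySem.Set Int)
    (d : PySem.Dict Int (PySem.Set Int)) (k : Int) :
    ((l.foldl (fun d' z => d'.modify z PySem.Set.empty (fun s => PySem.Set.update s u)) d).getD k
        PySem.Set.empty) =
      if k ∈ l then PySem.Set.update (d.getD k PySem.Set.empty) u
      else d.getD k PySem.Set.empty := by
  induction l generalizing d with
  | nil => simp
  | cons z l ih =>
    simp only [List.foldl_cons, List.nodup_cons] at hl ⊢
    rw [ih hl.2]
    by_cases hk : k = z
    · subst hk
      simp [hl.1, PySem.Dict.getD_modify_self]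
    · simp [hk, PySem.Dict.getD_modify_of_ne _ _ _ hk]

lemma foldl_update_groups (groups : List (List Int)) (s : PySem.Set Int) :
    groups.foldl (fun s group => PySem.Set.update s group) s = PySem.Set.update s groups.flatten := by
  induction groups generalizing s with
  | nil => simp [PySem.Set.update]
  | cons g t ih => simp [ih, PySem.Set.update_append]

-- ---- initial-dict lemmas ----

lemma aInit_eq (ids : List Int) (hnd : ids.Nodup) :
    aInit ids = PySem.Dict.mk (ids.map fun x => (x, [x])) := by
  apply PySem.Dict.ext
  have h := PySem.Dict.items_foldl_insert_fresh (d := (PySem.Dict.empty : PySem.Dict Int (PySem.Set Int)))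
      ids (fun x => x) (fun x => PySem.Set.ofList [x]) (by intro a _; rfl) (by simpa using hnd)
  simpa [aInit] using h

lemma keys_aInit (ids : List Int) (hnd : ids.Nodup) : (aInit ids).keys = ids := by
  rw [aInit_eq ids hnd]
  simp only [PySem.Dict.keys, List.map_map]
  exact List.map_id ids

lemma getD_aInit (ids : List Int) (hnd : ids.Nodup) (x : Int) (hx : x ∈ ids) :
    (aInit ids).getD x PySem.Set.empty = [x] := by
  rw [aInit_eq ids hnd]
  induction ids with
  | nil => cases hx
  | cons z l ih =>
    by_cases hz : z = x
    · subst hz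
      show ((PySem.Dict.mk ((z, [z]) :: l.map fun x => (x, [x]))).get? z).getD _ = _
      rw [PySem.Dict.get?_mk_cons]
      simp
    · have hx' : x ∈ l := by cases hx with | head => exact absurd rfl hz | tail _ h => exact h
      show ((PySem.Dict.mk ((z, [z]) :: l.map fun x => (x, [x]))).get? x).getD _ = _
      rw [PySem.Dict.get?_mk_cons]
      simp only [beq_iff_eq, if_neg hz]
      exact ih hnd.of_cons hx'

lemma couple_init (ids : List Int) (hnd : ids.Nodup) : Couple ids (aInit ids) [] := by
  refine ⟨keys_aInit ids hnd, by simp, by simp, ?_, by simp, ?_⟩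
  · intro x hx; rw [getD_aInit ids hnd x hx]; simp
  · intro x hx _ y; rw [getD_aInit ids hnd x hx]; simp

-- ---- B-side step characterisation ----

lemma emMergeSplit_eq (group : List Int) (parts : List (List Int)) :
    emMergeSplit group parts =
      ((parts.filter (fun p => p.any (fun x => group.contains x))).flatten,
       parts.filter (fun p => !(p.any (fun x => group.contains x)))) := by
  have aux : ∀ (ps : List (List Int)) (m : List Int) (r : List (List Int)),
      ps.foldl (fun mr part =>
          if part.any (fun x => group.contains x) then (mr.1 ++ part, mr.2)
          else (mr.1, mr.2 ++ [part])) (m, r) =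
        (m ++ (ps.filter (fun p => p.any (fun x => group.contains x))).flatten,
         r ++ ps.filter (fun p => !(p.any (fun x => group.contains x)))) := by
    intro ps
    induction ps with
    | nil => simp
    | cons p t ih =>
      intro m r
      rw [List.foldl_cons]
      by_cases hp : (p.any fun x => group.contains x) = true
      · rw [if_pos hp, ih]
        have hp' : ∃ x ∈ p, x ∈ group := by simpa using hp
        simp [hp']
      · rw [if_neg hp, ih]
        have hp' : ¬ ∃ x ∈ p, x ∈ group := by simpa using hp
        simp [List.filter_cons, hp']
  rw [emMergeSplit, aux parts [] []]
  simp only [List.nil_append]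

lemma merged_eq_update (group : List Int) (m0 : List Int) :
    group.foldl (fun m x => if m.contains x then m else m ++ [x]) m0 =
      PySem.Set.update m0 group := by
  induction group generalizing m0 with
  | nil => rfl
  | cons x t ih =>
    rw [List.foldl_cons, PySem.Set.update_cons, ih]
    congr 1

lemma emStep_eq (parts : List (List Int)) (group : List Int) :
    emStep parts group =
      if (PySem.Set.update (parts.filter (fun p => p.any (fun x => group.contains x))).flatten group).isEmpty
      then parts.filter (fun p => !(p.any (fun x => group.contains x)))
      else parts.filter (fun p => !(p.any (fun x => group.contains x))) ++
        [PySem.Set.update (parts.filter (fun p => p.any (fun x => group.contains x))).flatten group] := by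
  show (if (group.foldl (fun m x => if m.contains x then m else m ++ [x]) (emMergeSplit group parts).1).isEmpty
        then (emMergeSplit group parts).2
        else (emMergeSplit group parts).2 ++
          [group.foldl (fun m x => if m.contains x then m else m ++ [x]) (emMergeSplit group parts).1]) = _
  rw [emMergeSplit_eq, merged_eq_update]

-- swap the elaborated DecidableLT instance for the one sorted_eq_sorted_of_perm is stated with
lemma sorted_listInt_congr (xs ys : List (List Int)) (h : xs.Perm ys) :
    PySem.List.sorted xs (fun v => v) = PySem.List.sorted ys (fun v => v) := by
  rw [show (fun (a b : List Int) => a.decidableLT b) = (LinearOrder.toDecidableLT : DecidableLT (List Int)) from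
    Subsingleton.elim _ _]
  exact PySem.List.sorted_eq_sorted_of_perm _ _ _ (fun a b hab => hab) h

-- two entries of a pairwise-disjoint partition that share an element are the same list
lemma part_unique (parts : List (List Int)) (hpw : parts.Pairwise List.Disjoint)
    (p q : List Int) (hp : p ∈ parts) (hq : q ∈ parts) (x : Int) (hxp : x ∈ p) (hxq : x ∈ q) :
    p = q := by
  induction parts with
  | nil => cases hp
  | cons a t ih =>
    have hpw' := (List.pairwise_cons.mp hpw)
    cases hp with
    | head =>
      cases hq with
      | head => rfl
      | tail _ hq' => exact absurd hxq (hpw'.1 q hq' hxp)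
    | tail _ hp' =>
      cases hq with
      | head => exact absurd hxp (hpw'.1 p hp' hxq)
      | tail _ hq' => exact ih hpw'.2 hp' hq'

-- ---- the main step lemma: one group preserves the coupling ----

lemma couple_step (ids : List Int) (d : PySem.Dict Int (PySem.Set Int))
    (parts : List (List Int)) (group : List Int)
    (hg : ∀ x ∈ group, x ∈ ids) (h : Couple ids d parts) :
    Couple ids (aStep d group) (emStep parts group) := by
  obtain ⟨hkeys, hwf, hpw, hnd, hpart, hfree⟩ := h
  -- names for the intermediate values of both steps
  set u : PySem.Set Int :=
    group.foldl (fun u x => PySem.Set.update u (d.getD x PySem.Set.empty)) PySem.Set.empty with hu_def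
  set meets : List (List Int) := parts.filter (fun p => p.any (fun x => group.contains x)) with hmeets
  set rest : List (List Int) := parts.filter (fun p => !(p.any (fun x => group.contains x))) with hrest
  set merged : List Int := PySem.Set.update meets.flatten group with hmerged_def
  -- membership facts
  have hmem_u : ∀ y, y ∈ u ↔ ∃ x ∈ group, y ∈ d.getD x PySem.Set.empty := by
    intro y; simpa using mem_foldl_update (fun x => d.getD x PySem.Set.empty) group PySem.Set.empty y
  have hmem_flat : ∀ y, y ∈ meets.flatten ↔ ∃ p ∈ parts, (∃ x ∈ p, x ∈ group) ∧ y ∈ p := by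
    intro y
    simp only [List.mem_flatten, hmeets, List.mem_filter, List.any_eq_true]
    constructor
    · rintro ⟨p, ⟨hp, hex⟩, hyp⟩
      exact ⟨p, hp, by simpa using hex, hyp⟩
    · rintro ⟨p, hp, hex, hyp⟩
      exact ⟨p, ⟨hp, by simpa using hex⟩, hyp⟩
  have hmem_merged : ∀ y, y ∈ merged ↔ y ∈ meets.flatten ∨ y ∈ group := by
    intro y; rw [hmerged_def]; exact PySem.Set.mem_update _ _ _
  -- pairwise-disjoint facts
  have hmeets_sub : ∀ p ∈ meets, p ∈ parts := fun p hp => List.mem_of_mem_filter hp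
  have hrest_sub : ∀ p ∈ rest, p ∈ parts := fun p hp => List.mem_of_mem_filter hp
  -- a rest part is disjoint from merged
  have hrest_disj : ∀ p ∈ rest, ∀ y ∈ p, y ∉ merged := by
    intro p hp y hyp hym
    have hfp : ∀ z ∈ p, z ∉ group := by
      have h2 := (List.mem_filter.mp hp).2
      simp only [Bool.not_eq_eq_eq_not, Bool.not_true, List.any_eq_false] at h2
      intro z hz
      simpa using h2 z hz
    rcases (hmem_merged y).mp hym with hfl | hgr
    · rcases (hmem_flat y).mp hfl with ⟨q, hq, hex, hyq⟩
      have hpq : p = q := part_unique parts hpw p q (hrest_sub p hp) hq y hyp hyq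
      subst hpq
      rcases hex with ⟨x, hxp, hxg⟩
      exact hfp x hxp hxg
    · exact hfp y hyp hgr
  -- u and merged have the same members
  have hu_merged : ∀ y, y ∈ u ↔ y ∈ merged := by
    intro y
    rw [hmem_u, hmem_merged]
    constructor
    · rintro ⟨x, hxg, hyx⟩
      by_cases hxin : ∃ p ∈ parts, x ∈ p
      · rcases hxin with ⟨p, hp, hxp⟩
        have hy : y ∈ p := ((hpart x (hg x hxg) p hp hxp y).mp hyx)
        exact Or.inl ((hmem_flat y).mpr ⟨p, hp, ⟨x, hxp, hxg⟩, hy⟩)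
      · push Not at hxin
        have : y = x := (hfree x (hg x hxg) hxin y).mp hyx
        exact Or.inr (this ▸ hxg)
    · rintro (hfl | hgr)
      · rcases (hmem_flat y).mp hfl with ⟨p, hp, ⟨x, hxp, hxg⟩, hyp⟩
        exact ⟨x, hxg, (hpart x (hg x hxg) p hp hxp y).mpr hyp⟩
      · refine ⟨y, hgr, ?_⟩
        by_cases hyin : ∃ p ∈ parts, y ∈ p
        · rcases hyin with ⟨p, hp, hyp⟩
          exact (hpart y (hg y hgr) p hp hyp y).mpr hyp
        · push Not at hyin
          exact (hfree y (hg y hgr) hyin y).mpr rfl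
  -- u is a set over ids
  have hu_nodup : u.Nodup := nodup_foldl_update _ group _ (by simp)
  have hu_sub_ids : ∀ y ∈ u, y ∈ ids := by
    intro y hy
    rcases (hmem_u y).mp hy with ⟨x, hxg, hyx⟩
    by_cases hxin : ∃ p ∈ parts, x ∈ p
    · rcases hxin with ⟨p, hp, hxp⟩
      exact (hwf p hp).2.2 y ((hpart x (hg x hxg) p hp hxp y).mp hyx)
    · push Not at hxin
      have : y = x := (hfree x (hg x hxg) hxin y).mp hyx
      exact this ▸ hg x hxg
  -- the A step in closed form
  have hstep : ∀ k, (aStep d group).getD k PySem.Set.empty =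
      if k ∈ u then PySem.Set.update (d.getD k PySem.Set.empty) u
      else d.getD k PySem.Set.empty := by
    intro k
    exact getD_foldl_modify_update u hu_nodup u d k
  have hkeys' : (aStep d group).keys = ids := by
    show (u.foldl (fun d' z => d'.modify z PySem.Set.empty (fun s => PySem.Set.update s u)) d).keys = ids
    rw [PySem.Dict.keys_foldl_modify u PySem.Set.empty (fun _ _ => (fun s => PySem.Set.update s u)) d]
    rw [hkeys]
    exact update_of_subset ids u hu_sub_ids
  -- the B step in closed form
  have hB : emStep parts group = if merged.isEmpty then rest else rest ++ [merged] := by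
    rw [emStep_eq, ← hmeets, ← hrest, ← hmerged_def]
  -- merged facts
  have hmerged_nodup : merged.Nodup := by
    rw [hmerged_def]
    apply PySem.Set.nodup_update
    exact List.nodup_flatten.mpr
      ⟨fun l hl => (hwf l (hmeets_sub l hl)).2.1, (hpw.filter _)⟩
  have hmerged_sub_ids : ∀ y ∈ merged, y ∈ ids := by
    intro y hy
    rcases (hmem_merged y).mp hy with hfl | hgr
    · rcases (hmem_flat y).mp hfl with ⟨p, hp, _, hyp⟩
      exact (hwf p hp).2.2 y hyp
    · exact hg y hgr
  -- membership in the new parts list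
  have hparts'_cases : ∀ p, p ∈ emStep parts group → p ∈ rest ∨ (p = merged ∧ merged ≠ []) := by
    intro p hp
    rw [hB] at hp
    by_cases hempty : merged.isEmpty
    · rw [if_pos hempty] at hp; exact Or.inl hp
    · rw [if_neg hempty] at hp
      rcases List.mem_append.mp hp with h1 | h2
      · exact Or.inl h1
      · exact Or.inr ⟨List.mem_singleton.mp h2, by simpa using hempty⟩
  have hmerged_mem : merged ≠ [] → merged ∈ emStep parts group := by
    intro hne
    rw [hB, if_neg (by simpa using hne)]
    exact List.mem_append.mpr (Or.inr (List.mem_singleton.mpr rfl))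
  -- assemble the six clauses
  refine ⟨hkeys', ?_, ?_, ?_, ?_, ?_⟩
  · -- well-formed parts
    intro p hp
    rcases hparts'_cases p hp with hpr | ⟨hpm, hne⟩
    · exact hwf p (hrest_sub p hpr)
    · subst hpm
      exact ⟨hne, hmerged_nodup, hmerged_sub_ids⟩
  · -- pairwise disjoint
    rw [hB]
    by_cases hempty : merged.isEmpty
    · rw [if_pos hempty]; exact hpw.filter _
    · rw [if_neg hempty]
      rw [List.pairwise_append]
      refine ⟨hpw.filter _, List.pairwise_singleton _ _, ?_⟩
      intro p hp q hq
      rw [List.mem_singleton.mp hq]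
      intro y hyp hym
      exact hrest_disj p hp y hyp hym
  · -- getD values stay nodup
    intro x hx
    rw [hstep x]
    by_cases hxu : x ∈ u
    · rw [if_pos hxu]; exact PySem.Set.nodup_update _ _ (hnd x hx)
    · rw [if_neg hxu]; exact hnd x hx
  · -- clause: x in a part of the new partition
    intro x hx p hp hxp y
    rcases hparts'_cases p hp with hpr | ⟨hpm, hne⟩
    · -- p is an untouched rest part: x ∉ u, dict entry unchanged
      have hxu : x ∉ u := by
        intro hxu
        exact hrest_disj p hpr x hxp ((hu_merged x).mp hxu)
      rw [hstep x, if_neg hxu]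
      exact hpart x hx p (hrest_sub p hpr) hxp y
    · -- p is the merged part
      subst hpm
      have hxu : x ∈ u := (hu_merged x).mpr hxp
      rw [hstep x, if_pos hxu, PySem.Set.mem_update]
      constructor
      · rintro (hyd | hyu)
        · -- y was in x's old component; that component is inside merged
          rcases (hmem_merged x).mp hxp with hxfl | hxg
          · rcases (hmem_flat x).mp hxfl with ⟨q, hq, hex, hxq⟩
            have hyq : y ∈ q := (hpart x hx q hq hxq y).mp hyd
            exact (hmem_merged y).mpr (Or.inl ((hmem_flat y).mpr ⟨q, hq, hex, hyq⟩))
          · by_cases hxin : ∃ q ∈ parts, x ∈ q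
            · rcases hxin with ⟨q, hq, hxq⟩
              have hyq : y ∈ q := (hpart x hx q hq hxq y).mp hyd
              exact (hmem_merged y).mpr (Or.inl ((hmem_flat y).mpr ⟨q, hq, ⟨x, hxq, hxg⟩, hyq⟩))
            · push Not at hxin
              have : y = x := (hfree x hx hxin y).mp hyd
              exact this ▸ hxp
        · exact (hu_merged y).mp hyu
      · intro hym
        exact Or.inr ((hu_merged y).mpr hym)
  · -- clause: x in no part of the new partition
    intro x hx hnone y
    have hxm : x ∉ merged := by
      intro hxm
      have hne : merged ≠ [] := List.ne_nil_of_mem hxm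
      exact hnone merged (hmerged_mem hne) hxm
    have hxold : ∀ p ∈ parts, x ∉ p := by
      intro p hp hxp
      by_cases hmeet : (p.any (fun x => group.contains x)) = true
      · have hex : ∃ z ∈ p, z ∈ group := by simpa using hmeet
        exact hxm ((hmem_merged x).mpr (Or.inl ((hmem_flat x).mpr ⟨p, hp, hex, hxp⟩)))
      · have hpr : p ∈ rest := by
          rw [hrest]
          exact List.mem_filter.mpr ⟨hp, by simpa using hmeet⟩
        by_cases hempty : merged.isEmpty
        · exact hnone p (by rw [hB, if_pos hempty]; exact hpr) hxp
        · exact hnone p (by rw [hB, if_neg hempty]; exact List.mem_append.mpr (Or.inl hpr)) hxp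
    have hxu : x ∉ u := fun hxu => hxm ((hu_merged x).mp hxu)
    rw [hstep x, if_neg hxu]
    exact hfree x hx hxold y

-- ---- folding the coupling over all groups ----

lemma couple_fold (ids : List Int) (gs : List (List Int)) (d : PySem.Dict Int (PySem.Set Int))
    (parts : List (List Int)) (hg : ∀ g ∈ gs, ∀ x ∈ g, x ∈ ids) (h : Couple ids d parts) :
    Couple ids (gs.foldl aStep d) (gs.foldl emStep parts) := by
  induction gs generalizing d parts with
  | nil => exact h
  | cons g t ih =>
    exact ih _ _ (fun g' hg' => hg g' (List.mem_cons_of_mem _ hg'))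
      (couple_step ids d parts g (hg g (List.mem_cons_self)) h)

-- ---- coverage: after its group is processed, an id is in some component, forever ----

lemma cover_step_new (parts : List (List Int)) (group : List Int) (x : Int) (hx : x ∈ group) :
    ∃ p ∈ emStep parts group, x ∈ p := by
  rw [emStep_eq]
  have hxm : x ∈ PySem.Set.update (List.filter (fun p => p.any fun x => group.contains x) parts).flatten group :=
    (PySem.Set.mem_update _ _ _).mpr (Or.inr hx)
  rw [if_neg (by simpa using List.ne_nil_of_mem hxm)]
  exact ⟨_, List.mem_append.mpr (Or.inr (List.mem_singleton.mpr rfl)), hxm⟩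

lemma cover_step_old (parts : List (List Int)) (group : List Int) (x : Int)
    (hx : ∃ p ∈ parts, x ∈ p) : ∃ p ∈ emStep parts group, x ∈ p := by
  rcases hx with ⟨p, hp, hxp⟩
  rw [emStep_eq]
  by_cases hmeet : (p.any (fun z => group.contains z)) = true
  · have hxm : x ∈ PySem.Set.update (List.filter (fun p => p.any fun z => group.contains z) parts).flatten group :=
      (PySem.Set.mem_update _ _ _).mpr
        (Or.inl (List.mem_flatten.mpr ⟨p, List.mem_filter.mpr ⟨hp, hmeet⟩, hxp⟩))
    rw [if_neg (by simpa using List.ne_nil_of_mem hxm)]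
    exact ⟨_, List.mem_append.mpr (Or.inr (List.mem_singleton.mpr rfl)), hxm⟩
  · have hpr : p ∈ parts.filter (fun p => !(p.any (fun z => group.contains z))) :=
      List.mem_filter.mpr ⟨hp, by simpa using hmeet⟩
    by_cases hempty : (PySem.Set.update (List.filter (fun p => p.any fun z => group.contains z) parts).flatten group).isEmpty
    · rw [if_pos hempty]; exact ⟨p, hpr, hxp⟩
    · rw [if_neg hempty]; exact ⟨p, List.mem_append.mpr (Or.inl hpr), hxp⟩

lemma cover_fold_keep (gs : List (List Int)) (parts : List (List Int)) (x : Int)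
    (hx : ∃ p ∈ parts, x ∈ p) : ∃ p ∈ gs.foldl emStep parts, x ∈ p := by
  induction gs generalizing parts with
  | nil => exact hx
  | cons g t ih => exact ih _ (cover_step_old parts g x hx)

lemma cover_fold (gs : List (List Int)) (parts : List (List Int)) (x : Int)
    (hx : ∃ g ∈ gs, x ∈ g) : ∃ p ∈ gs.foldl emStep parts, x ∈ p := by
  induction gs generalizing parts with
  | nil => rcases hx with ⟨g, hg, _⟩; cases hg
  | cons g t ih =>
    rcases hx with ⟨g', hg', hxg'⟩
    cases hg' with
    | head => exact cover_fold_keep t _ x (cover_step_new parts g x hxg')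
    | tail _ h => exact ih _ ⟨g', h, hxg'⟩

-- ---- the final extraction ----

theorem extend_matches_spec : Claim_equal_extend_matches := by
  intro groups _
  show extend_matches groups = extend_matches_alt groups
  -- name the id universe
  set ids : List Int := PySem.Set.ofList groups.flatten with hids_def
  have hids_nodup : ids.Nodup := PySem.Set.nodup_ofList _
  have hids_mem : ∀ x, x ∈ ids ↔ ∃ g ∈ groups, x ∈ g := by
    intro x
    rw [hids_def, PySem.Set.mem_ofList, List.mem_flatten]
  have hg : ∀ g ∈ groups, ∀ x ∈ g, x ∈ ids := by
    intro g hgm x hx; exact (hids_mem x).mpr ⟨g, hgm, hx⟩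
  -- A's unique_ids is exactly ids
  have huids : groups.foldl (fun s group => PySem.Set.update s group) PySem.Set.empty = ids := by
    rw [foldl_update_groups]
    rfl
  -- run the coupled induction
  have hcouple : Couple ids (groups.foldl aStep (aInit ids)) (groups.foldl emStep []) :=
    couple_fold ids groups (aInit ids) [] hg (couple_init ids hids_nodup)
  obtain ⟨hkeys, hwf, hpw, hnd, hpart, hfree⟩ := hcouple
  set dF := groups.foldl aStep (aInit ids) with hdF
  set partsF := groups.foldl emStep [] with hpF
  -- coverage: every id is in some final component
  have hcover : ∀ x ∈ ids, ∃ p ∈ partsF, x ∈ p := by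
    intro x hx
    exact cover_fold groups [] x ((hids_mem x).mp hx)
  -- for x in a component p, the dict value sorts to the same list as p
  have hsorted_eq : ∀ x ∈ ids, ∀ p ∈ partsF, x ∈ p →
      PySem.List.sorted (dF.getD x PySem.Set.empty) (fun v => v) =
        PySem.List.sorted p (fun v => v) := by
    intro x hx p hp hxp
    apply PySem.List.sorted_eq_sorted_of_perm _ _ _ (fun a b hab => hab)
    exact (List.perm_ext_iff_of_nodup (hnd x hx) (hwf p hp).2.1).mpr
      (hpart x hx p hp hxp)
  -- A's result in terms of ids
  have hitems : dF.items = ids.map (fun k => (k, dF.getD k PySem.Set.empty)) := by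
    have h := PySem.Dict.items_eq_map_keys dF (by rw [hkeys]; exact hids_nodup) PySem.Set.empty
    rw [hkeys] at h
    exact h
  have hA : extend_matches groups =
      PySem.List.sorted
        (PySem.Set.ofList (dF.items.map (fun p => PySem.List.sorted p.2 (fun v => v))))
        (fun v => v) := by
    simp only [extend_matches]
    rw [huids]
    rfl
  rw [hA, hitems, List.map_map]
  simp only [Function.comp_def]
  show _ = PySem.List.sorted (partsF.map (fun p => PySem.List.sorted p (fun v => v))) (fun v => v)
  -- both argument lists are nodup with the same members, hence permutations
  apply sorted_listInt_congr
  have hpwne : partsF.Pairwise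
      (fun p q => PySem.List.sorted p (fun v => v) ≠ PySem.List.sorted q (fun v => v)) := by
    refine hpw.imp_of_mem ?_
    intro p q hpm hqm hdisj heq
    rcases List.exists_mem_of_ne_nil p (hwf p hpm).1 with ⟨x, hxp⟩
    have hxq : x ∈ PySem.List.sorted q (fun v => v) :=
      heq ▸ ((PySem.List.mem_sorted p (fun v => v) false x).mpr hxp)
    exact hdisj hxp ((PySem.List.mem_sorted q (fun v => v) false x).mp hxq)
  have hnodupB : (partsF.map (fun p => PySem.List.sorted p (fun v => v))).Nodup :=
    List.pairwise_map.mpr hpwne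
  refine (List.perm_ext_iff_of_nodup (PySem.Set.nodup_ofList _) hnodupB).mpr ?_
  intro y
  rw [PySem.Set.mem_ofList, List.mem_map, List.mem_map]
  constructor
  · rintro ⟨x, hx, rfl⟩
    obtain ⟨p, hp, hxp⟩ := hcover x hx
    exact ⟨p, hp, (hsorted_eq x hx p hp hxp).symm⟩
  · rintro ⟨p, hp, rfl⟩
    rcases List.exists_mem_of_ne_nil p (hwf p hp).1 with ⟨x, hxp⟩
    have hx : x ∈ ids := (hwf p hp).2.2 x hxp
    exact ⟨x, hx, hsorted_eq x hx p hp hxp⟩
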